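-- pv_equiv track=rewrite | github.com/glockyco/erenshor-data-mining | src/erenshor/application/wiki/services/generate_service.py | _extract_template_at_position
-- ===== SOURCE A (Python) =====
-- def _extract_template_at_position(wikitext: str, start: int) -> str:
--     """Extract template starting at given position.
--
--     Args:
--         wikitext: Raw wikitext
--         start: Position where template starts (at the first '{')
--
--     Returns:
--         Raw template text including {{ and }}
--     """
--     brace_count = 0
--     i = start
--     while i < len(wikitext):
--         if wikitext[i : i + 2] == "{{":
--             brace_count += 1
--             i += 2
--         elif wikitext[i : i + 2] == "}}":
--             brace_count -= 1
--             i += 2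
--             if brace_count == 0:
--                 return wikitext[start:i]
--         else:
--             i += 1
--     return wikitext[start:]  # Unclosed template, return rest
-- ===== SOURCE B (Python) =====
-- def _extract_template_at_position(wikitext: str, start: int) -> str:
--     """Extract template starting at given position.
--
--     Splits the tail on '}}' and counts '{{' per segment in bulk, instead of
--     scanning character by character: each split separator closes one level,
--     each segment opens part.count('{{') levels; the template ends at the
--     separator where the running level first drops to zero.
--     """
--     parts = wikitext[start:].split("}}")
--     depth = 0
--     end = start
--     for part in parts[:-1]:
--         depth += part.count("{{") - 1
--         end += len(part) + 2
--         if depth == 0: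
--             return wikitext[start:end]
--     return wikitext[start:]  # Unclosed template, return rest
-- ===== Notes on version B (the rewrite author's own statement) =====
-- stated objective: faster
-- what changed: Replaces the character-by-character while-loop with its running index and per-position two-char slice tests by a staged bulk-string formulation: split the tail on '}}' once, then fold over the resulting segments adding segment.count('{{')-1 per segment, returning at the segment boundary where the running level first reaches zero.
-- outside the precondition, e.g. on _extract_template_at_position('{{{{}}{', -3): A returns '}}', B returns '}}{'; on _extract_template_at_position('}}{{b', -3): A returns '', B returns '{{b'
import Mathlib
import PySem

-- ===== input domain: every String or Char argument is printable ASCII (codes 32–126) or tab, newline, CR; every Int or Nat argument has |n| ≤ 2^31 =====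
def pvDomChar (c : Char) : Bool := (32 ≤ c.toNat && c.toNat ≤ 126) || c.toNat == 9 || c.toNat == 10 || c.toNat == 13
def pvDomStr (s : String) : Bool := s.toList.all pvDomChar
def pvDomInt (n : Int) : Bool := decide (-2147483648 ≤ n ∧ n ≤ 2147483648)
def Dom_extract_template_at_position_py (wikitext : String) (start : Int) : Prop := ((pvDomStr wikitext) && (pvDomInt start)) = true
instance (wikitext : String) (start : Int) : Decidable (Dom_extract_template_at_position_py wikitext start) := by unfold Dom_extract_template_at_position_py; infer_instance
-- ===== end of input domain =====

-- B replaces A's character-by-character scan by a staged bulk formulation: split the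
-- tail on "}}" once, then fold over the segments adding count("{{")-1 per segment
-- (objective: faster by a constant factor — bulk str.split/str.count replace the per-character interpreted loop); same return value for all start ≥ 0.

-- ===== PORT A =====
-- A's while loop: i scans from start, brace_count is the nesting depth; the Nat
-- argument is structural fuel (initially enough for the whole scan), the real
-- loop condition is 'i < len(wikitext)' exactly as in Python.
def pvALoop (cs : List Char) (start : Int) (i : Int) (bc : Int) : Nat → String
  | 0 => String.ofList (PySem.List.slice cs (some start) none)
  | fuel + 1 =>
    if i < (cs.length : Int) then
      if PySem.List.slice cs (some i) (some (i + 2)) = ['{', '{'] then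
        pvALoop cs start (i + 2) (bc + 1) fuel
      else if PySem.List.slice cs (some i) (some (i + 2)) = ['}', '}'] then
        if bc - 1 = 0 then String.ofList (PySem.List.slice cs (some start) (some (i + 2)))
        else pvALoop cs start (i + 2) (bc - 1) fuel
      else pvALoop cs start (i + 1) bc fuel
    else String.ofList (PySem.List.slice cs (some start) none)

def extract_template_at_position_py (wikitext : String) (start : Int) : String :=
  pvALoop wikitext.toList start start 0 ((wikitext.toList.length : Int) - start).toNat

-- ===== PORT B =====
-- Python-exact s.split("}}") on char lists: a separator "}}" at the front closes the
-- current (empty) part; otherwise the first char is prepended to the first part of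
-- the split of the tail. Faithful port of str.split with the literal separator "}}".
def pySplitCC : List Char → List (List Char)
  | [] => [[]]
  | c :: rest =>
    if c = '}' ∧ rest.take 1 = ['}'] then
      [] :: pySplitCC rest.tail
    else
      (c :: (pySplitCC rest).headI) :: (pySplitCC rest).tail
termination_by l => l.length
decreasing_by all_goals (simp [List.length_tail]; try omega)

-- Python-exact s.count("{{") on char lists (non-overlapping, leftmost).
def pyCountOO : List Char → Nat
  | [] => 0
  | c :: rest =>
    if c = '{' ∧ rest.take 1 = ['{'] then pyCountOO rest.tail + 1
    else pyCountOO rest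
termination_by l => l.length
decreasing_by all_goals (simp [List.length_tail]; try omega)

-- B's for-loop over parts[:-1] with the running level 'depth' and end offset 'e'.
def pvBGo (full : List Char) (start : Int) : List (List Char) → Int → Int → String
  | [], _, _ => String.ofList (PySem.List.slice full (some start) none)
  | p :: ps, depth, e =>
    let depth' := depth + (pyCountOO p : Int) - 1
    let e' := e + (p.length : Int) + 2
    if depth' = 0 then String.ofList (PySem.List.slice full (some start) (some e'))
    else pvBGo full start ps depth' e'

def extract_template_at_position_py_alt (wikitext : String) (start : Int) : String :=
  pvBGo wikitext.toList start
    ((pySplitCC (PySem.List.slice wikitext.toList (some start) none)).dropLast) 0 start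

-- ===== PRECONDITION & SPEC =====
-- Pre_ excludes negative start, where both programs' results are accidents of Python's
-- negative-index/slice handling (A's two-char slice windows with a negative index wrap
-- to the end of the string while B's wikitext[start:] takes the last |start| chars);
-- 'start' is documented as the position of the template's first '{', so a negative
-- start is outside the function's contract and neither value is the specified one.
def Pre_extract_template_at_position_py (wikitext : String) (start : Int) : Prop := 0 ≤ start
instance (wikitext : String) (start : Int) : Decidable (Pre_extract_template_at_position_py wikitext start) := by unfold Pre_extract_template_at_position_py; infer_instance

def pvWitness_extract_template_at_position_py : String × Int := ("{{a{{b}}c}}x", 0)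

def Spec_extract_template_at_position_py (wikitext : String) (start : Int) (out : String) : Prop := out = extract_template_at_position_py_alt wikitext start
instance (wikitext : String) (start : Int) (out : String) : Decidable (Spec_extract_template_at_position_py wikitext start out) := by unfold Spec_extract_template_at_position_py; infer_instance

-- ===== CLAIM (what is proved, stated in full; the proofs are below) =====
def Claim_equal_extract_template_at_position_py : Prop := ∀ (wikitext : String) (start : Int), Dom_extract_template_at_position_py wikitext start → Pre_extract_template_at_position_py wikitext start → Spec_extract_template_at_position_py wikitext start (extract_template_at_position_py wikitext start)

-- ===== LEMMAS AND PROOFS =====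

theorem pySplitCC_nil : pySplitCC [] = [[]] := by rw [pySplitCC]

theorem pyCountOO_nil : pyCountOO [] = 0 := by rw [pyCountOO]

theorem pvBGo_cons (full : List Char) (start : Int) (p : List Char) (ps : List (List Char))
    (bc e : Int) :
    pvBGo full start (p :: ps) bc e
      = if bc + (pyCountOO p : Int) - 1 = 0 then
          String.ofList (PySem.List.slice full (some start) (some (e + (p.length : Int) + 2)))
        else pvBGo full start ps (bc + (pyCountOO p : Int) - 1) (e + (p.length : Int) + 2) := rfl

theorem pvBGo_nil (full : List Char) (start : Int) (bc e : Int) :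
    pvBGo full start [] bc e = String.ofList (PySem.List.slice full (some start) none) := rfl

theorem pySplitCC_ne_nil (l : List Char) : pySplitCC l ≠ [] := by
  rw [pySplitCC.eq_def]
  cases l with
  | nil => simp
  | cons c rest => dsimp only; split <;> simp

theorem pySplitCC_cons (c : Char) (rest : List Char) (h : ¬(c = '}' ∧ rest.take 1 = ['}'])) :
    pySplitCC (c :: rest) = (c :: (pySplitCC rest).headI) :: (pySplitCC rest).tail := by
  rw [pySplitCC.eq_def]; simp [h]

theorem pySplitCC_sep (rest : List Char) :
    pySplitCC ('}' :: '}' :: rest) = [] :: pySplitCC rest := by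
  rw [pySplitCC.eq_def]; simp

-- the first split part starts with the first char of the input (or is empty)
theorem headI_pySplitCC_take (l : List Char) :
    (pySplitCC l).headI = [] ∨ (pySplitCC l).headI.take 1 = l.take 1 := by
  rw [pySplitCC.eq_def]
  cases l with
  | nil => simp
  | cons c rest => dsimp only; split <;> simp

theorem pyCountOO_cons_of_not (c : Char) (rest : List Char)
    (h : ¬(c = '{' ∧ rest.take 1 = ['{'])) : pyCountOO (c :: rest) = pyCountOO rest := by
  rw [pyCountOO.eq_def]; simp [h]

theorem pyCountOO_open (rest : List Char) :
    pyCountOO ('{' :: '{' :: rest) = pyCountOO rest + 1 := by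
  rw [pyCountOO.eq_def]; simp

-- shifting a prefix of the first part into the position offset does not change pvBGo
theorem pvBGo_shift (full : List Char) (start : Int) (p q : List Char) (T : List (List Char))
    (bc d i k : Int)
    (hc : (pyCountOO p : Int) = (pyCountOO q : Int) + d)
    (hl : (p.length : Int) = (q.length : Int) + k) :
    pvBGo full start ((p :: T).dropLast) bc i
      = pvBGo full start ((q :: T).dropLast) (bc + d) (i + k) := by
  cases T with
  | nil => simp [List.dropLast, pvBGo]
  | cons t ts =>
    rw [List.dropLast_cons₂, List.dropLast_cons₂, pvBGo_cons, pvBGo_cons]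
    have h1 : bc + (pyCountOO p : Int) - 1 = (bc + d) + (pyCountOO q : Int) - 1 := by omega
    have h2 : i + (p.length : Int) + 2 = (i + k) + (q.length : Int) + 2 := by omega
    rw [h1, h2]

-- l.headI :: l.tail = l for nonempty l
theorem headI_cons_tail {α : Type} [Inhabited α] (l : List α) (h : l ≠ []) :
    l.headI :: l.tail = l := by
  cases l with
  | nil => exact absurd rfl h
  | cons a t => rfl

-- MAIN: A's fused scan from position i at depth bc equals B's fold over the
-- '}}'-split of the remaining suffix, for any sufficient fuel.
theorem pvALoop_eq (cs : List Char) (start : Int) :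
    ∀ (fuel : Nat) (i bc : Int), 0 ≤ i → (cs.length : Int) - i ≤ (fuel : Int) →
      pvALoop cs start i bc fuel
        = pvBGo cs start (pySplitCC (cs.drop i.toNat)).dropLast bc i := by
  intro fuel
  induction fuel with
  | zero =>
    intro i bc hi hf
    have hdrop : cs.drop i.toNat = [] := by
      apply List.drop_eq_nil_of_le; omega
    simp [pvALoop, hdrop, pySplitCC_nil, pvBGo_nil]
  | succ fuel ih =>
    intro i bc hi hf
    rw [pvALoop]
    by_cases hlt : i < (cs.length : Int)
    · simp only [hlt, if_pos]
      -- the two-char window is the head of the suffix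
      have hslice : PySem.List.slice cs (some i) (some (i + 2)) = (cs.drop i.toNat).take 2 := by
        rw [PySem.List.slice_toNat cs hi (by omega : (0:Int) ≤ i + 2)]
        congr 1; omega
      obtain ⟨c, t', ht⟩ : ∃ c t', cs.drop i.toNat = c :: t' := by
        rcases h : cs.drop i.toNat with _ | ⟨c, t'⟩
        · exfalso
          have := List.drop_eq_nil_iff.mp h; omega
        · exact ⟨c, t', rfl⟩
      have hdrop1 : cs.drop (i + 1).toNat = t' := by
        have : (i + 1).toNat = i.toNat + 1 := by omega
        rw [this, ← List.tail_drop, ht]; rfl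
      rw [hslice, ht]
      by_cases hopen : c = '{' ∧ t'.take 1 = ['{']
      · -- "{{" case
        obtain ⟨rfl, ht1⟩ := hopen
        obtain ⟨rest, rfl⟩ : ∃ rest, t' = '{' :: rest := by
          rcases t' with _ | ⟨d, r⟩ <;> simp_all
        have hdrop2 : cs.drop (i + 2).toNat = rest := by
          have : (i + 2).toNat = (i.toNat + 1) + 1 := by omega
          rw [this, ← List.tail_drop, ← List.tail_drop, ht]; rfl
        rw [if_pos (by simp : List.take 2 ('{' :: '{' :: rest) = (['{', '{'] : List Char))]
        rw [ih (i + 2) (bc + 1) (by omega) (by omega), hdrop2]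
        -- B side: first part gains the two '{' chars
        have hne := pySplitCC_ne_nil rest
        have hd1 : ¬('{' = '}' ∧ ('{' :: rest).take 1 = ['}']) := by simp
        have hd2 : ¬('{' = '}' ∧ rest.take 1 = ['}']) := by simp
        rw [pySplitCC_cons _ _ hd1, pySplitCC_cons _ _ hd2]
        simp only [List.headI_cons, List.tail_cons]
        have hcount : (pyCountOO ('{' :: '{' :: (pySplitCC rest).headI) : Int)
            = (pyCountOO (pySplitCC rest).headI : Int) + 1 := by
          rw [pyCountOO_open]; push_cast; ring
        have hlen : ((('{' : Char) :: '{' :: (pySplitCC rest).headI).length : Int)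
            = (((pySplitCC rest).headI).length : Int) + 2 := by simp; ring
        have := pvBGo_shift cs start ('{' :: '{' :: (pySplitCC rest).headI)
          (pySplitCC rest).headI (pySplitCC rest).tail bc 1 i 2 hcount hlen
        rw [this, headI_cons_tail _ hne]
      · by_cases hclose : c = '}' ∧ t'.take 1 = ['}']
        · -- "}}" case
          obtain ⟨rfl, ht1⟩ := hclose
          obtain ⟨rest, rfl⟩ : ∃ rest, t' = '}' :: rest := by
            rcases t' with _ | ⟨d, r⟩ <;> simp_all
          have hdrop2 : cs.drop (i + 2).toNat = rest := by
            have : (i + 2).toNat = (i.toNat + 1) + 1 := by omega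
            rw [this, ← List.tail_drop, ← List.tail_drop, ht]; rfl
          rw [if_neg (by simp), if_pos (by simp)]
          -- B side: split starts with an empty part
          rw [pySplitCC_sep]
          have hne := pySplitCC_ne_nil rest
          rw [List.dropLast_cons_of_ne_nil hne, pvBGo_cons]
          simp only [pyCountOO_nil, List.length_nil]
          have hd : bc + ((0 : Nat) : Int) - 1 = bc - 1 := by omega
          have he : i + ((0 : Nat) : Int) + 2 = i + 2 := by omega
          by_cases hz : bc - 1 = 0
          · rw [if_pos hz]
            rw [if_pos (by omega : bc + ((0 : Nat) : Int) - 1 = 0)]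
            simp
          · rw [if_neg hz]
            rw [if_neg (by omega : ¬(bc + ((0 : Nat) : Int) - 1 = 0))]
            rw [ih (i + 2) (bc - 1) (by omega) (by omega), hdrop2]
            congr 1 <;> omega
        · -- single-char step
          have hnot1 : ¬((c :: t').take 2 = ['{', '{']) := by
            rcases t' with _ | ⟨d, r⟩ <;> simp_all
          have hnot2 : ¬((c :: t').take 2 = ['}', '}']) := by
            rcases t' with _ | ⟨d, r⟩ <;> simp_all
          rw [if_neg hnot1, if_neg hnot2]
          rw [ih (i + 1) bc (by omega) (by omega), hdrop1]
          -- B side: first char moves from the first part into the offset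
          have hne := pySplitCC_ne_nil t'
          rw [pySplitCC_cons _ _ hclose]
          have hcount : (pyCountOO (c :: (pySplitCC t').headI) : Int)
              = (pyCountOO (pySplitCC t').headI : Int) + 0 := by
            rw [pyCountOO_cons_of_not]
            · ring
            · rintro ⟨rfl, hh⟩
              rcases headI_pySplitCC_take t' with h0 | h0
              · rw [h0] at hh; simp at hh
              · rw [h0] at hh; exact hopen ⟨rfl, hh⟩
          have hlen : ((c :: (pySplitCC t').headI).length : Int)
              = (((pySplitCC t').headI).length : Int) + 1 := by simp
          have := pvBGo_shift cs start (c :: (pySplitCC t').headI)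
            (pySplitCC t').headI (pySplitCC t').tail bc 0 i 1 hcount hlen
          rw [this, headI_cons_tail _ hne]
          congr 1; omega
    · simp only [hlt, if_neg, not_false_iff]
      have hdrop : cs.drop i.toNat = [] := by
        apply List.drop_eq_nil_of_le; omega
      simp [hdrop, pySplitCC_nil, pvBGo_nil]

-- ===== VERDICT (by name: the statement is the Claim_ definition above) =====
theorem extract_template_at_position_py_spec : Claim_equal_extract_template_at_position_py := by
  intro wikitext start _ hpre
  unfold Spec_extract_template_at_position_py
  unfold extract_template_at_position_py extract_template_at_position_py_alt
  unfold Pre_extract_template_at_position_py at hpre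
  rw [PySem.List.slice_from wikitext.toList hpre]
  exact pvALoop_eq wikitext.toList start _ start 0 hpre (Int.self_le_toNat _)
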